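-- pv_equiv track=rewrite | github.com/dawit-melka/Competitive-Programming | Replace Elements in an Array.py | arrayChange
-- ===== SOURCE A (Python) =====
-- from typing import List
--
-- def arrayChange(nums: List[int], operations: List[List[int]]) -> List[int]:
--     num_idexs = {}
--     for i, num in enumerate(nums):
--         num_idexs[num] = i
--
--     for curr_val, new_val in operations:
--         idx = num_idexs[curr_val]
--         nums[idx] = new_val
--         num_idexs[new_val] = idx
--         del num_idexs[curr_val]
--
--     return nums
-- ===== SOURCE B (Python) =====
-- def arrayChange(nums, operations):
--     # Collapse the operation chains by scanning operations in reverse: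
--     # final[curr] = ultimate value that curr becomes.  Then rewrite nums in place.
--     final = {}
--     for curr_val, new_val in reversed(operations):
--         final[curr_val] = final.get(new_val, new_val)
--     for i in range(len(nums)):
--         nums[i] = final.get(nums[i], nums[i])
--     return nums
-- ===== Notes on version B (the rewrite author's own statement) =====
-- stated objective: alternative
-- what changed: B drops A's live value-to-index dictionary and in-place index updates; instead it builds a value-to-final-value map by scanning operations once in reverse (collapsing chains via final[curr] = final.get(new, new)) and then rewrites nums elementwise in one pass.
-- outside the precondition, e.g. on arrayChange([1, 1], [[1, 5]]): A returns [1, 5], B returns [5, 5]; on arrayChange([1, 2], [[1, 2], [2, 3]]): A returns [3, 2], B returns [3, 3]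
import Mathlib
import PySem

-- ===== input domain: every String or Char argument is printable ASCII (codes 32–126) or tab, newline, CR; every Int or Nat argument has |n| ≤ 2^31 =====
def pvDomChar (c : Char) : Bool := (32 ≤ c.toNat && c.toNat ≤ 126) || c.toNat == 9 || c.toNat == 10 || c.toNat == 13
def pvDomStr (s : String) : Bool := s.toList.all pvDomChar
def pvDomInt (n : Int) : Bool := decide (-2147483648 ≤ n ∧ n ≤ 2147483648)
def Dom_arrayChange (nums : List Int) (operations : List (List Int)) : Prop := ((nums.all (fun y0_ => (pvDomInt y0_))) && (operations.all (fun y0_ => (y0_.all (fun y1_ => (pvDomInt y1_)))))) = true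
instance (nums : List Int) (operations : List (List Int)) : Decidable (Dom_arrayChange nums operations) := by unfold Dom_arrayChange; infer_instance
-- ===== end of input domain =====

-- B replaces A's live value→index dictionary with a value→final-value map built by one
-- reverse scan over operations, then one elementwise rewrite of nums (objective: alternative).
-- Both Pythons mutate `nums` in place and return it; the equivalence proved is about the
-- returned value (B performs the same in-place rewrite).

-- ===== PORT A =====
-- num_idexs = {}; for i, num in enumerate(nums): num_idexs[num] = i
def aInit (nums : List Int) : PySem.Dict Int Int :=
  (PySem.List.enumerate nums 0).foldl (fun d p => d.insert p.2 p.1) PySem.Dict.empty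

-- one iteration of A's operations loop; `none` = the Python raises
-- (ValueError on an operation not of length 2, KeyError on a missing curr_val) — outside Pre_.
def aStep (st : List Int × PySem.Dict Int Int) (op : List Int) :
    Option (List Int × PySem.Dict Int Int) :=
  match op with
  | [c, nw] =>
    match st.2.get? c with
    | some idx => some (PySem.List.pySetD st.1 idx nw, (st.2.insert nw idx).erase c)
    | none => none
  | _ => none

def aLoop (ops : List (List Int)) (st : List Int × PySem.Dict Int Int) :
    Option (List Int × PySem.Dict Int Int) :=
  ops.foldl (fun acc op => acc.bind (fun st => aStep st op)) (some st)

def arrayChange (nums : List Int) (operations : List (List Int)) : List Int :=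
  -- `.getD []` is only reached where the Python raises; such inputs are outside Pre_.
  ((aLoop operations (nums, aInit nums)).map Prod.fst).getD []

-- ===== PORT B =====
-- final = {}; for curr, new in reversed(operations): final[curr] = final.get(new, new)
-- (an operation not of length 2 makes the Python raise ValueError; outside Pre_ the port skips it)
def bFinal (operations : List (List Int)) : PySem.Dict Int Int :=
  operations.reverse.foldl (fun f op =>
    match op with
    | [c, nw] => f.insert c (f.getD nw nw)
    | _ => f) PySem.Dict.empty

-- for i in range(len(nums)): nums[i] = final.get(nums[i], nums[i])  (elementwise rewrite)
def arrayChange_alt (nums : List Int) (operations : List (List Int)) : List Int :=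
  let f := bFinal operations
  nums.map (fun x => f.getD x x)

-- ===== PRECONDITION & SPEC =====
-- does the operation list stay valid: each op is [c, nw] with c currently present and nw not
def opsOK (vals : List Int) (ops : List (List Int)) : Bool :=
  match ops with
  | [] => true
  | op :: rest =>
    match op with
    | [c, nw] => (vals.count c == 1) && !vals.contains nw &&
        opsOK (vals.map (fun v => if v = c then nw else v)) rest
    | _ => false

-- Pre_ excludes inputs where A raises (KeyError on an absent curr_val, ValueError on an
-- operation not of length 2) and the defensible corners where an operation's curr_val occurs
-- more than once in the current array or its new_val is already present, where A's result is
-- an accident of last-wins dict insertion and index aliasing.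
def Pre_arrayChange (nums : List Int) (operations : List (List Int)) : Prop :=
  opsOK nums operations = true

instance (nums : List Int) (operations : List (List Int)) : Decidable (Pre_arrayChange nums operations) := by
  unfold Pre_arrayChange; infer_instance

def pvWitness_arrayChange : List Int × List (List Int) := ([1, 2, 3], [[1, 4], [4, 5]])

def Spec_arrayChange (nums : List Int) (operations : List (List Int)) (out : List Int) : Prop := out = arrayChange_alt nums operations
instance (nums : List Int) (operations : List (List Int)) (out : List Int) : Decidable (Spec_arrayChange nums operations out) := by unfold Spec_arrayChange; infer_instance

-- ===== CLAIM (what is proved, stated in full; the proofs are below) =====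
def Claim_equal_arrayChange : Prop := ∀ (nums : List Int) (operations : List (List Int)), Dom_arrayChange nums operations → Pre_arrayChange nums operations → Spec_arrayChange nums operations (arrayChange nums operations)

-- ===== LEMMAS AND PROOFS =====

-- the chronological substitution chain: what a value becomes after all operations
def chain (ops : List (List Int)) (x : Int) : Int :=
  ops.foldl (fun y op => match op with | [c, nw] => if y = c then nw else y | _ => y) x

lemma chain_cons (c nw : Int) (ops : List (List Int)) (x : Int) :
    chain ([c, nw] :: ops) x = chain ops (if x = c then nw else x) := rfl

-- B computes `chain` for every value (no validity needed)
lemma getD_bFinal (ops : List (List Int)) : ∀ x : Int, (bFinal ops).getD x x = chain ops x := by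
  induction ops with
  | nil => intro x; simp [bFinal, chain, PySem.Dict.getD_empty]
  | cons op rest ih =>
    intro x
    have hrw : bFinal (op :: rest) =
        (match op with
         | [c, nw] => (bFinal rest).insert c ((bFinal rest).getD nw nw)
         | _ => bFinal rest) := by
      simp [bFinal, List.foldl_append]
    match op with
    | [] => simpa [hrw, chain] using ih x
    | [c] => simpa [hrw, chain] using ih x
    | (c :: nw :: z :: t) => simpa [hrw, chain] using ih x
    | [c, nw] =>
      rw [hrw, chain_cons]
      by_cases hx : x = c
      · subst hx
        rw [if_pos rfl]
        rw [PySem.Dict.getD_insert_self]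
        exact ih nw
      · rw [if_neg hx, PySem.Dict.getD_insert_of_ne _ _ _ hx]
        exact ih x

lemma get?_erase_of_ne (d : PySem.Dict Int Int) (k k' : Int) (h : k' ≠ k) :
    (d.erase k).get? k' = d.get? k' := by
  obtain ⟨items⟩ := d
  simp only [PySem.Dict.erase, PySem.Dict.get?]
  induction items with
  | nil => rfl
  | cons p rest ih =>
    by_cases hp : p.1 = k
    · simpa [List.filter_cons, hp, Ne.symm h] using ih
    · by_cases hp' : p.1 = k'
      · simp [hp', h]
      · simpa [List.filter_cons, hp, hp'] using ih

-- a value with count 1 has a unique position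
lemma eq_of_count_one (l : List Int) (c : Int) (h : l.count c = 1) :
    ∀ i j (hi : i < l.length) (hj : j < l.length), l[i] = c → l[j] = c → i = j := by
  induction l with
  | nil => intro i j hi _ _ _; exact absurd hi (by simp)
  | cons a t ih =>
    intro i j hi hj hci hcj
    by_cases hac : a = c
    · have ht : t.count c = 0 := by
        have := h; rw [List.count_cons, if_pos (by simp [hac])] at this; omega
      have htm : c ∉ t := by simpa using List.count_eq_zero.mp ht
      match i, j with
      | 0, 0 => rfl
      | 0, j + 1 =>
        have hj' : j < t.length := by simpa using hj
        exact absurd (hcj ▸ List.getElem_mem hj' : c ∈ t) htm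
      | i + 1, 0 =>
        have hi' : i < t.length := by simpa using hi
        exact absurd (hci ▸ List.getElem_mem hi' : c ∈ t) htm
      | i + 1, j + 1 =>
        have hi' : i < t.length := by simpa using hi
        exact absurd (hci ▸ List.getElem_mem hi' : c ∈ t) htm
    · have ht : t.count c = 1 := by
        have := h; rw [List.count_cons, if_neg (by simp [hac])] at this; omega
      match i, j with
      | 0, _ => exact absurd hci hac
      | _ + 1, 0 => exact absurd hcj hac
      | i + 1, j + 1 =>
        simp only [List.getElem_cons_succ] at hci hcj
        exact congrArg Nat.succ (ih ht i j (by simpa using hi) (by simpa using hj) hci hcj)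

lemma set_eq_map_subst (cur : List Int) (j : Nat) (hj : j < cur.length) (c nw : Int)
    (hc : cur[j] = c)
    (huniq : ∀ k (hk : k < cur.length), cur[k] = c → k = j) :
    cur.set j nw = cur.map (fun v => if v = c then nw else v) := by
  apply List.ext_getElem
  · simp
  · intro i h1 h2
    have hi : i < cur.length := by simpa using h1
    rw [List.getElem_set, List.getElem_map]
    by_cases hij : j = i
    · subst hij; simp [hc]
    · rw [if_neg hij]
      have hic : cur[i] ≠ c := fun hic => hij ((huniq i hi hic).symm)
      simp [hic]

-- the initial dict sends each value to its LAST index in nums (last-wins insertion)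
lemma aInit_get? (nums : List Int) :
    ∀ i (h : i < nums.length), (∀ k (hk : k < nums.length), i < k → nums[k] ≠ nums[i]) →
      (aInit nums).get? nums[i] = some (i : Int) := by
  induction nums using List.reverseRecOn with
  | nil => intro i hi; exact absurd hi (by simp)
  | append_singleton xs x ih =>
    have hfold : aInit (xs ++ [x]) = (aInit xs).insert x (0 + (xs.length : Int)) := by
      simp [aInit, PySem.List.enumerate_append, PySem.List.enumerate_cons,
        PySem.List.enumerate_nil, List.foldl_append]
    intro i hi hlast
    have hlen : i < xs.length + 1 := by simpa using hi
    rcases Nat.lt_or_ge i xs.length with hlt | hge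
    · have hxi : (xs ++ [x])[i] = xs[i] := List.getElem_append_left hlt
      have hxne : x ≠ xs[i] := by
        have := hlast xs.length (by simp) hlt
        have hx : (xs ++ [x])[xs.length]'(by simp) = x := by simp
        rw [hx, hxi] at this
        exact this
      rw [hxi, hfold, PySem.Dict.get?_insert_of_ne _ _ (Ne.symm hxne)]
      apply ih i hlt
      intro k hk hik
      have := hlast k (by simp [Nat.lt_succ_of_lt hk]) hik
      simpa [List.getElem_append_left hk, hxi] using this
    · have hieq : i = xs.length := by omega
      subst hieq
      rw [hfold]
      simp [PySem.Dict.get?_insert_self]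

lemma aLoop_fst : ∀ (ops : List (List Int)) (cur : List Int) (d : PySem.Dict Int Int),
    (∀ i (hi : i < cur.length), (∀ k (hk : k < cur.length), i < k → cur[k] ≠ cur[i]) →
        d.get? cur[i] = some (i : Int)) →
    opsOK cur ops = true →
    (aLoop ops (cur, d)).map Prod.fst = some (cur.map (chain ops)) := by
  intro ops
  induction ops with
  | nil =>
    intro cur d _ _
    simp only [aLoop, List.foldl_nil, Option.map_some, Option.some.injEq]
    have : List.map (chain []) cur = List.map id cur := List.map_congr_left (fun x _ => rfl)
    rw [this, List.map_id]
  | cons op rest ih =>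
    intro cur d hd hok
    match op with
    | [] => simp [opsOK] at hok
    | [c] => simp [opsOK] at hok
    | (c :: nw :: z :: t) => simp [opsOK] at hok
    | [c, nw] =>
      simp only [opsOK, Bool.and_eq_true, Bool.not_eq_true', beq_iff_eq] at hok
      obtain ⟨⟨hcnt, hnwmem⟩, hrest⟩ := hok
      have hc : c ∈ cur := by
        have : 0 < cur.count c := by omega
        exact List.count_pos_iff.mp this
      have hnw : nw ∉ cur := by
        intro hmem
        have := (List.contains_iff_mem).mpr hmem
        rw [hnwmem] at this
        exact Bool.false_ne_true this
      obtain ⟨j, hj, hcj⟩ := List.mem_iff_getElem.mp hc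
      have huniq : ∀ k (hk : k < cur.length), cur[k] = c → k = j :=
        fun k hk hck => eq_of_count_one cur c hcnt k j hk hj hck hcj
      have hncw : nw ≠ c := fun he => hnw (he ▸ hcj ▸ List.getElem_mem hj)
      have hgc : d.get? c = some (j : Int) := by
        rw [← hcj]
        apply hd j hj
        intro k hk hjk hck
        exact absurd (huniq k hk (hck.trans hcj)) (by omega)
      have hset : cur.set j nw = cur.map (fun v => if v = c then nw else v) :=
        set_eq_map_subst cur j hj c nw hcj huniq
      have hstep : aStep (cur, d) [c, nw] =
          some (cur.map (fun v => if v = c then nw else v), (d.insert nw (j : Int)).erase c) := by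
        simp [aStep, hgc, ← hset]
      have haLoop : aLoop ([c, nw] :: rest) (cur, d) =
          aLoop rest (cur.map (fun v => if v = c then nw else v), (d.insert nw (j : Int)).erase c) := by
        simp [aLoop, hstep]
      rw [haLoop]
      have hd' : ∀ i (hi : i < (cur.map (fun v => if v = c then nw else v)).length),
          (∀ k (hk : k < (cur.map (fun v => if v = c then nw else v)).length), i < k →
              (cur.map (fun v => if v = c then nw else v))[k] ≠
                (cur.map (fun v => if v = c then nw else v))[i]) →
          ((d.insert nw (j : Int)).erase c).get?
            (cur.map (fun v => if v = c then nw else v))[i] = some (i : Int) := by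
        intro i hi hlast
        have hic : i < cur.length := by simpa using hi
        rw [List.getElem_map]
        by_cases hij : j = i
        · subst hij
          rw [if_pos hcj, get?_erase_of_ne _ _ _ hncw, PySem.Dict.get?_insert_self]
        · have hvc : cur[i] ≠ c := fun hck => hij ((huniq i hic hck).symm)
          have hvnw : cur[i] ≠ nw := fun he => hnw (he ▸ List.getElem_mem hic)
          rw [if_neg hvc, get?_erase_of_ne _ _ _ hvc,
            PySem.Dict.get?_insert_of_ne _ _ hvnw]
          apply hd i hic
          intro k hk hik
          by_cases hkc : cur[k] = c
          · rw [hkc]; exact (Ne.symm hvc)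
          · have h1 := hlast k (by simpa using hk) hik
            rw [List.getElem_map, List.getElem_map, if_neg hkc, if_neg hvc] at h1
            exact h1
      rw [ih _ _ hd' hrest]
      simp only [List.map_map, Option.some.injEq]
      apply List.map_congr_left
      intro x _
      rfl

-- ===== VERDICT (by name: the statement is the Claim_ definition above) =====
theorem arrayChange_spec : Claim_equal_arrayChange := by
  intro nums ops _ hok
  unfold Spec_arrayChange arrayChange arrayChange_alt
  have h := aLoop_fst ops nums (aInit nums) (aInit_get? nums) hok
  rw [h]
  simp only [Option.getD_some]
  exact List.map_congr_left (fun x _ => (getD_bFinal ops x).symm)
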